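-- pv_equiv track=rewrite | github.com/Dhiraj73Ray/Strong-Password | StrongPassword/validators.py | _contains_palindrome
-- ===== SOURCE A (Python) =====
-- def _contains_palindrome(s: str):
--     s_clean = ''.join(c.lower() for c in s if c.isalnum())
--     n = len(s_clean)
--     for i in range(n):
--         for j in range(i + 3, n + 1):
--             if s_clean[i:j] == s_clean[i:j][::-1]:
--                 return True
--     return False
-- ===== SOURCE B (Python) =====
-- def _contains_palindrome(s: str):
--     # B: any palindrome of length >= 3 contains a centered length-3 or length-4
--     # palindrome, so one linear window scan suffices.
--     t = [c.lower() for c in s if c.isalnum()]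
--     n = len(t)
--     for i in range(n - 2):
--         if t[i] == t[i + 2] or (i + 3 < n and t[i] == t[i + 3] and t[i + 1] == t[i + 2]):
--             return True
--     return False
-- ===== Notes on version B (the rewrite author's own statement) =====
-- stated objective: faster
-- what changed: Replaced the cubic scan over all substrings of length >= 3 with a single linear window scan for a length-3 (t[i]==t[i+2]) or length-4 (t[i]==t[i+3] and t[i+1]==t[i+2]) palindrome, exact because every palindrome of length >= 3 contains one at its center.
import Mathlib
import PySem

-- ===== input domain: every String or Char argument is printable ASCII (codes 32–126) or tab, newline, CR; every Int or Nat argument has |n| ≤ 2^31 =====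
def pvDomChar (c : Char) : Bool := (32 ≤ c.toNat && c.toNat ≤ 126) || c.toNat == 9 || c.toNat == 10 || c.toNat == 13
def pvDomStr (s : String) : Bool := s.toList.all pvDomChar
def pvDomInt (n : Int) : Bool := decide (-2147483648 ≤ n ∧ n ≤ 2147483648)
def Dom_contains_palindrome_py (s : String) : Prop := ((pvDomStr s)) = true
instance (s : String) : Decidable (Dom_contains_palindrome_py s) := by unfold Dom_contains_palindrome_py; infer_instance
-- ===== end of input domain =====

-- B replaces A's scan over all substrings of length ≥ 3 by one linear window scan for a
-- length-3 or length-4 palindrome, exact because every palindrome of length ≥ 3 contains one.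

-- ===== PORT A =====
def contains_palindrome_py (s : String) : Bool :=
  let sClean : List Char := (s.toList.filter (fun c => PySem.Chars.isalnum c)).map PySem.Chars.lowerChar
  let n : Int := sClean.length
  (PySem.List.pyRange 0 n 1).any fun i =>
    (PySem.List.pyRange (i + 3) (n + 1) 1).any fun j =>
      let sub := PySem.List.slice sClean (some i) (some j)
      -- sub[::-1]; the step is -1 ≠ 0, so slice? never returns none here
      sub == (PySem.List.slice? sub none none (-1)).getD []

-- ===== PORT B =====
-- one sliding window over the cleaned list: length-3 then length-4 check at each position
def pvScanB : List Char → Bool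
  | a :: b :: c :: rest =>
      (a == c) || (match rest with | d :: _ => (a == d) && (b == c) | [] => false)
        || pvScanB (b :: c :: rest)
  | _ => false

def contains_palindrome_py_alt (s : String) : Bool :=
  pvScanB ((s.toList.filter (fun c => PySem.Chars.isalnum c)).map PySem.Chars.lowerChar)

-- ===== PRECONDITION & SPEC =====
def Spec_contains_palindrome_py (s : String) (out : Bool) : Prop := out = contains_palindrome_py_alt s
instance (s : String) (out : Bool) : Decidable (Spec_contains_palindrome_py s out) := by unfold Spec_contains_palindrome_py; infer_instance

-- ===== CLAIM (what is proved, stated in full; the proofs are below) =====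
def Claim_equal_contains_palindrome_py : Prop := ∀ (s : String), Dom_contains_palindrome_py s → Spec_contains_palindrome_py s (contains_palindrome_py s)

-- ===== LEMMAS AND PROOFS =====

-- B's scan finds exactly the length-3 / length-4 palindromic infixes.
theorem pvScanB_iff (l : List Char) :
    pvScanB l = true ↔ (∃ a b, [a, b, a] <:+: l) ∨ (∃ a b, [a, b, b, a] <:+: l) := by
  fun_induction pvScanB l with
  | case1 a b c rest ih =>
    simp only [Bool.or_eq_true, beq_iff_eq, ih]
    constructor
    · rintro ((h | h) | (⟨x, y, hi⟩ | ⟨x, y, hi⟩))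
      · exact Or.inl ⟨a, b, h ▸ ⟨[], rest, by simp⟩⟩
      · match rest, h with
        | d :: rest', h =>
          simp at h
          exact Or.inr ⟨a, b, by rw [h.1, ← h.2]; exact ⟨[], rest', by simp⟩⟩
      · exact Or.inl ⟨x, y, hi.trans ⟨[a], [], by simp⟩⟩
      · exact Or.inr ⟨x, y, hi.trans ⟨[a], [], by simp⟩⟩
    · rintro (⟨x, y, hi⟩ | ⟨x, y, hi⟩)
      · rcases List.infix_cons_iff.mp hi with hp | hi'
        · rcases List.cons_prefix_cons.mp hp with ⟨h1, hp⟩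
          rcases List.cons_prefix_cons.mp hp with ⟨h2, hp⟩
          rcases List.cons_prefix_cons.mp hp with ⟨h3, _⟩
          exact Or.inl (Or.inl (by rw [← h1, h3]))
        · exact Or.inr (Or.inl ⟨x, y, hi'⟩)
      · rcases List.infix_cons_iff.mp hi with hp | hi'
        · rcases List.cons_prefix_cons.mp hp with ⟨h1, hp⟩
          rcases List.cons_prefix_cons.mp hp with ⟨h2, hp⟩
          rcases List.cons_prefix_cons.mp hp with ⟨h3, hp⟩
          match rest, hp with
          | e :: rest', hp =>
            rcases List.cons_prefix_cons.mp hp with ⟨h4, _⟩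
            exact Or.inl (Or.inr (by simp [← h1, ← h2, h4, h3]))
        · exact Or.inr (Or.inr ⟨x, y, hi'⟩)
  | case2 l hne =>
    have hl : l.length < 3 := by
      match l, hne with
      | [], _ => simp
      | [_], _ => simp
      | [_, _], _ => simp
      | a :: b :: c :: r, hne => exact absurd rfl (hne a b c r)
    constructor
    · intro h; simp at h
    rintro (⟨x, y, hi⟩ | ⟨x, y, hi⟩) <;>
    · have := hi.length_le
      simp at this; omega

theorem drop_take_infix (l : List Char) (a b : Nat) : (l.drop a).take b <:+: l :=
  ((l.drop a).take_prefix b).isInfix.trans (l.drop_suffix a).isInfix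

-- A's double loop finds exactly the palindromic infixes of length ≥ 3.
theorem acore_iff (l : List Char) :
    ((PySem.List.pyRange 0 (l.length : Int) 1).any fun i =>
      (PySem.List.pyRange (i + 3) ((l.length : Int) + 1) 1).any fun j =>
        let sub := PySem.List.slice l (some i) (some j)
        sub == (PySem.List.slice? sub none none (-1)).getD []) = true ↔
    ∃ t, t <:+: l ∧ 3 ≤ t.length ∧ t.reverse = t := by
  simp only [List.any_eq_true, PySem.List.mem_pyRange_one,
    PySem.List.slice?_none_none_neg_one, Option.getD_some, beq_iff_eq]
  constructor
  · rintro ⟨i, ⟨hi0, hin⟩, j, ⟨hj3, hjn⟩, hp⟩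
    refine ⟨PySem.List.slice l (some i) (some j), ?_, ?_, hp.symm⟩
    · rw [PySem.List.slice_toNat l hi0 (by omega)]
      exact drop_take_infix l _ _
    · rw [PySem.List.slice_toNat l hi0 (by omega)]
      simp only [List.length_take, List.length_drop]
      omega
  · rintro ⟨t, ⟨p, q, rfl⟩, h3, hr⟩
    refine ⟨(p.length : Int), ⟨by omega, by simp; try omega⟩,
      (p.length : Int) + (t.length : Int), ⟨by omega, by simp; try omega⟩, ?_⟩
    rw [PySem.List.slice_natCast_add]
    rw [List.append_assoc, List.drop_left, List.take_left]
    exact hr.symm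

-- every palindrome of length ≥ 3 contains a length-3 or length-4 palindrome at its center
theorem pal_center (t : List Char) (hp : List.Palindrome t) (h3 : 3 ≤ t.length) :
    (∃ a b, [a, b, a] <:+: t) ∨ (∃ a b, [a, b, b, a] <:+: t) := by
  induction hp with
  | nil => simp at h3
  | singleton x => simp at h3
  | cons_concat x hm ih =>
    rename_i m
    rcases Nat.lt_or_ge m.length 3 with hlt | hge
    · interval_cases h : m.length
      · simp at h3; omega
      · obtain ⟨b, rfl⟩ := List.length_eq_one_iff.mp h
        exact Or.inl ⟨x, b, List.infix_refl _⟩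
      · obtain ⟨b, c, rfl⟩ := List.length_eq_two.mp h
        have hcb : c = b := by have h2 := hm.reverse_eq; simp at h2; exact h2.1
        subst hcb
        exact Or.inr ⟨x, c, List.infix_refl _⟩
    · have hmm : m <:+: x :: (m ++ [x]) := ⟨[x], [x], by simp⟩
      rcases ih hge with ⟨a, b, hi⟩ | ⟨a, b, hi⟩
      · exact Or.inl ⟨a, b, hi.trans hmm⟩
      · exact Or.inr ⟨a, b, hi.trans hmm⟩

theorem core_eq (l : List Char) :
    ((PySem.List.pyRange 0 (l.length : Int) 1).any fun i =>
      (PySem.List.pyRange (i + 3) ((l.length : Int) + 1) 1).any fun j =>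
        let sub := PySem.List.slice l (some i) (some j)
        sub == (PySem.List.slice? sub none none (-1)).getD []) = pvScanB l := by
  rw [Bool.eq_iff_iff, acore_iff, pvScanB_iff]
  constructor
  · rintro ⟨t, hi, h3, hr⟩
    rcases pal_center t (List.Palindrome.of_reverse_eq hr) h3 with ⟨a, b, h⟩ | ⟨a, b, h⟩
    · exact Or.inl ⟨a, b, h.trans hi⟩
    · exact Or.inr ⟨a, b, h.trans hi⟩
  · rintro (⟨a, b, h⟩ | ⟨a, b, h⟩)
    · exact ⟨[a, b, a], h, by simp, by simp⟩
    · exact ⟨[a, b, b, a], h, by simp, by simp⟩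

-- ===== VERDICT (by name: the statement is the Claim_ definition above) =====
theorem contains_palindrome_py_spec : Claim_equal_contains_palindrome_py := by
  intro s _
  unfold Spec_contains_palindrome_py contains_palindrome_py contains_palindrome_py_alt
  exact core_eq _
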